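-- pv_equiv track=rewrite | github.com/yunhalee05/python_algorithm | 백준 알고리즘/2)구현/17140.이차원배열과연산.py | sort_graph
-- ===== SOURCE A (Python) =====
-- def sort_graph(a) :
--     l = []
--     for i in set(a) :
--         if i == 0 :
--             continue
--         l.append((i, a.count(i)))
--     l = sorted(l, key = lambda x: (x[1], x[0]))
--     result = []
--     for j in l :
--         result.append(j[0])
--         result.append(j[1])
--     return result
-- ===== SOURCE B (Python) =====
-- def sort_graph(a):
--     # Sort a copy once, then count maximal runs of equal adjacent values
--     # (skipping 0) instead of scanning a repeatedly with set()+a.count().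
--     b = sorted(a)
--     pairs = []
--     i, n = 0, len(b)
--     while i < n:
--         v = b[i]
--         j = i + 1
--         while j < n and b[j] == v:
--             j += 1
--         if v != 0:
--             pairs.append((v, j - i))
--         i = j
--     pairs.sort(key=lambda p: (p[1], p[0]))
--     out = []
--     for v, c in pairs:
--         out.append(v)
--         out.append(c)
--     return out
-- ===== Notes on version B (the rewrite author's own statement) =====
-- stated objective: faster
-- what changed: Replaces iterating set(a) with a full a.count(i) scan per distinct value by sorting a copy once and counting maximal runs of equal adjacent values in one pass, then sorting the (value,count) pairs by (count,value) as before.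
import Mathlib
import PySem

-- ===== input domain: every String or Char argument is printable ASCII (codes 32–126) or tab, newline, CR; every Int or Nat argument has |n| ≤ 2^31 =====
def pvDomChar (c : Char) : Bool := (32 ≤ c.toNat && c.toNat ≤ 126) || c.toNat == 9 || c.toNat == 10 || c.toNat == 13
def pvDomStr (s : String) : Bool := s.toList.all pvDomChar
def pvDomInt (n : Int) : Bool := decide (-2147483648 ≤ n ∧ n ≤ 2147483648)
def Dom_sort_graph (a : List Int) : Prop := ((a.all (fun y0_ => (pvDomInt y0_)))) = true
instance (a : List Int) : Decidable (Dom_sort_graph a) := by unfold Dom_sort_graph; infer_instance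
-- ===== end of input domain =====

-- B replaces the set()+repeated a.count() scans by sort-once-then-count-adjacent-runs; same return value.

-- ===== PORT A =====
def sort_graph (a : List Int) : List Int :=
  let l : List (Int × Int) :=
    (PySem.Set.ofList a).foldl
      (fun l i => if i == 0 then l else l ++ [(i, (PySem.List.count a i : Int))]) []
  let l := PySem.List.sorted2 l (fun x => x.2) (fun x => x.1)
  l.foldl (fun result j => result ++ [j.1, j.2]) []

-- ===== PORT B =====
-- one pass over the sorted copy: the inner while that scans a maximal run of v
-- becomes takeWhile/dropWhile on the tail
def runPairs : List Int → List (Int × Int)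
  | [] => []
  | v :: t =>
    if v == 0 then runPairs (t.dropWhile (fun x => x == v))
    else (v, ((t.takeWhile (fun x => x == v)).length + 1 : Int))
      :: runPairs (t.dropWhile (fun x => x == v))
termination_by l => l.length
decreasing_by all_goals simpa using Nat.lt_succ_of_le (List.length_dropWhile_le _ t)

def sort_graph_alt (a : List Int) : List Int :=
  let b := PySem.List.sorted a (fun x => x)
  let pairs := PySem.List.sorted2 (runPairs b) (fun p => p.2) (fun p => p.1)
  pairs.foldl (fun out p => out ++ [p.1, p.2]) []

-- ===== PRECONDITION & SPEC =====
def Spec_sort_graph (a : List Int) (out : List Int) : Prop := out = sort_graph_alt a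
instance (a : List Int) (out : List Int) : Decidable (Spec_sort_graph a out) := by unfold Spec_sort_graph; infer_instance

-- ===== CLAIM (what is proved, stated in full; the proofs are below) =====
def Claim_equal_sort_graph : Prop := ∀ (a : List Int), Dom_sort_graph a → Spec_sort_graph a (sort_graph a)

-- ===== LEMMAS AND PROOFS =====

-- A's accumulation loop over the deduplicated values is a filter+map
lemma foldl_skip_zero (cnt : Int → Int) (s : List Int) (acc : List (Int × Int)) :
    s.foldl (fun l i => if i == 0 then l else l ++ [(i, cnt i)]) acc
      = acc ++ (s.filter (fun i => !(i == 0))).map (fun i => (i, cnt i)) := by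
  induction s generalizing acc with
  | nil => simp
  | cons v t ih =>
    rw [List.foldl_cons, List.filter_cons]
    cases h : (v == 0) with
    | true =>
      simp only [Bool.not_true, Bool.false_eq_true, if_false]
      exact ih acc
    | false =>
      simp only [Bool.false_eq_true, if_false, Bool.not_false]
      rw [ih]; simp

lemma takeWhile_beq_all {v : Int} {t : List Int} :
    ∀ x ∈ t.takeWhile (fun x => x == v), x = v := by
  intro x hx
  have := List.mem_takeWhile_imp hx
  simpa using this

lemma not_mem_dropWhile_beq {v : Int} {t : List Int}
    (ht : t.Pairwise (· ≤ ·)) (hv : ∀ x ∈ t, v ≤ x) :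
    v ∉ t.dropWhile (fun x => x == v) := by
  intro hmem
  cases hrest : t.dropWhile (fun x => x == v) with
  | nil => simp [hrest] at hmem
  | cons w r =>
    have hsub : (t.dropWhile (fun x => x == v)).Sublist t := List.dropWhile_sublist _
    have hp : (w :: r).Pairwise (· ≤ ·) := by rw [← hrest]; exact ht.sublist hsub
    have hwne : w ≠ v := by
      have h0 := List.head?_dropWhile_not (fun x => x == v) t
      rw [hrest] at h0; simpa using h0
    have hwv : v < w := by
      have hwt : w ∈ t := hsub.mem (by simp [hrest])
      have := hv w hwt
      omega
    rw [hrest] at hmem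
    rcases List.mem_cons.mp hmem with h | h
    · omega
    · have := (List.pairwise_cons.mp hp).1 v h; omega

lemma count_takeWhile_dropWhile {v : Int} {t : List Int}
    (ht : t.Pairwise (· ≤ ·)) (hv : ∀ x ∈ t, v ≤ x) :
    (t.takeWhile (fun x => x == v)).length = t.count v := by
  conv_rhs => rw [← List.takeWhile_append_dropWhile (p := fun x => x == v) (l := t)]
  rw [List.count_append]
  have h1 : (t.takeWhile (fun x => x == v)).count v = (t.takeWhile (fun x => x == v)).length := by
    apply List.count_eq_length.mpr
    intro x hx; exact (takeWhile_beq_all x hx).symm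
  have h2 : (t.dropWhile (fun x => x == v)).count v = 0 :=
    List.count_eq_zero.mpr (not_mem_dropWhile_beq ht hv)
  omega

lemma mem_dropWhile_of_ne {v u : Int} {t : List Int} (hu : u ≠ v) :
    u ∈ t.dropWhile (fun x => x == v) ↔ u ∈ t := by
  constructor
  · intro h; exact (List.dropWhile_sublist _).mem h
  · intro h
    conv at h => rw [← List.takeWhile_append_dropWhile (p := fun x => x == v) (l := t)]
    rcases List.mem_append.mp h with h | h
    · exact absurd (takeWhile_beq_all u h) hu
    · exact h

lemma count_dropWhile_of_ne {v u : Int} {t : List Int} (hu : u ≠ v) :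
    (t.dropWhile (fun x => x == v)).count u = t.count u := by
  conv_rhs => rw [← List.takeWhile_append_dropWhile (p := fun x => x == v) (l := t)]
  rw [List.count_append]
  have : (t.takeWhile (fun x => x == v)).count u = 0 := by
    apply List.count_eq_zero.mpr
    intro h; exact hu (takeWhile_beq_all u h)
  omega

lemma mem_runPairs {b : List Int} (hb : b.Pairwise (· ≤ ·)) (p : Int × Int) :
    p ∈ runPairs b ↔ p.1 ∈ b ∧ p.1 ≠ 0 ∧ p.2 = (b.count p.1 : Int) := by
  induction b using runPairs.induct with
  | case1 => simp [runPairs]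
  | case2 v t hv0 ih =>
    have hvle : ∀ x ∈ t, v ≤ x := fun x hx => (List.pairwise_cons.mp hb).1 x hx
    have htp : t.Pairwise (· ≤ ·) := (List.pairwise_cons.mp hb).2
    have hrestp : (t.dropWhile (fun x => x == v)).Pairwise (· ≤ ·) :=
      htp.sublist (List.dropWhile_sublist _)
    have hv : v = 0 := by simpa using hv0
    rw [runPairs, if_pos hv0, ih hrestp]
    constructor
    · rintro ⟨h1, h2, h3⟩
      have hne : p.1 ≠ v := by omega
      refine ⟨List.mem_cons_of_mem _ ((List.dropWhile_sublist _).mem h1), h2, ?_⟩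
      rw [h3, count_dropWhile_of_ne hne, List.count_cons_of_ne (Ne.symm hne)]
    · rintro ⟨h1, h2, h3⟩
      have hne : p.1 ≠ v := by omega
      rcases List.mem_cons.mp h1 with h | h
      · exact absurd h hne
      · refine ⟨(mem_dropWhile_of_ne hne).mpr h, h2, ?_⟩
        rw [h3, count_dropWhile_of_ne hne, List.count_cons_of_ne (Ne.symm hne)]
  | case3 v t hv0 ih =>
    have hvle : ∀ x ∈ t, v ≤ x := fun x hx => (List.pairwise_cons.mp hb).1 x hx
    have htp : t.Pairwise (· ≤ ·) := (List.pairwise_cons.mp hb).2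
    have hrestp : (t.dropWhile (fun x => x == v)).Pairwise (· ≤ ·) :=
      htp.sublist (List.dropWhile_sublist _)
    have hv : v ≠ 0 := by simpa using hv0
    rw [runPairs, if_neg hv0, List.mem_cons, ih hrestp]
    constructor
    · rintro (h | ⟨h1, h2, h3⟩)
      · refine ⟨by rw [h]; exact List.mem_cons_self, by rw [h]; exact hv, ?_⟩
        rw [h]
        show ((t.takeWhile (fun x => x == v)).length + 1 : Int) = _
        rw [List.count_cons_self, count_takeWhile_dropWhile htp hvle]
        push_cast; ring
      · by_cases hne : p.1 = v
        · exact absurd (hne ▸ h1) (not_mem_dropWhile_beq htp hvle)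
        · refine ⟨List.mem_cons_of_mem _ ((List.dropWhile_sublist _).mem h1), h2, ?_⟩
          rw [h3, count_dropWhile_of_ne hne, List.count_cons_of_ne (Ne.symm hne)]
    · rintro ⟨h1, h2, h3⟩
      by_cases hne : p.1 = v
      · left
        have hc : p.2 = ((t.takeWhile (fun x => x == v)).length + 1 : Int) := by
          rw [h3, hne, List.count_cons_self, count_takeWhile_dropWhile htp hvle]
          push_cast; ring
        obtain ⟨p1, p2⟩ := p
        simp only at hne hc
        rw [hne, hc]
      · right
        rcases List.mem_cons.mp h1 with h | h
        · exact absurd h hne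
        · refine ⟨(mem_dropWhile_of_ne hne).mpr h, h2, ?_⟩
          rw [h3, count_dropWhile_of_ne hne, List.count_cons_of_ne (Ne.symm hne)]

lemma runPairs_fst_mem {b : List Int} {p : Int × Int} (h : p ∈ runPairs b) : p.1 ∈ b := by
  induction b using runPairs.induct with
  | case1 => simp [runPairs] at h
  | case2 v t hv0 ih =>
    rw [runPairs, if_pos hv0] at h
    exact List.mem_cons_of_mem _ ((List.dropWhile_sublist _).mem (ih h))
  | case3 v t hv0 ih =>
    rw [runPairs, if_neg hv0] at h
    rcases List.mem_cons.mp h with h | h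
    · rw [h]; exact List.mem_cons_self
    · exact List.mem_cons_of_mem _ ((List.dropWhile_sublist _).mem (ih h))

lemma runPairs_nodup {b : List Int} (hb : b.Pairwise (· ≤ ·)) : (runPairs b).Nodup := by
  have key : ∀ b : List Int, b.Pairwise (· ≤ ·) →
      (runPairs b).Pairwise (fun p q => p.1 ≠ q.1) := by
    intro b
    induction b using runPairs.induct with
    | case1 => intro _; simp [runPairs]
    | case2 v t hv0 ih =>
      intro hb'
      have htp : t.Pairwise (· ≤ ·) := (List.pairwise_cons.mp hb').2
      rw [runPairs, if_pos hv0]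
      exact ih (htp.sublist (List.dropWhile_sublist _))
    | case3 v t hv0 ih =>
      intro hb'
      have hvle : ∀ x ∈ t, v ≤ x := fun x hx => (List.pairwise_cons.mp hb').1 x hx
      have htp : t.Pairwise (· ≤ ·) := (List.pairwise_cons.mp hb').2
      rw [runPairs, if_neg hv0]
      refine List.pairwise_cons.mpr ⟨?_, ih (htp.sublist (List.dropWhile_sublist _))⟩
      intro q hq hcontra
      simp only at hcontra
      have hqm := runPairs_fst_mem hq
      rw [← hcontra] at hqm
      exact not_mem_dropWhile_beq htp hvle hqm
  exact (key b hb).imp (fun h => by intro hc; exact h (by rw [hc]))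

-- sorted2 with two Int keys is sorted with the lexicographic tuple key
lemma sorted2_eq_sorted_lex (xs : List (Int × Int)) :
    PySem.List.sorted2 xs (fun p => p.2) (fun p => p.1)
      = PySem.List.sorted xs (fun p => toLex (p.2, p.1)) := by
  rw [PySem.List.sorted_eq_foldl_insertBy]
  show List.foldl _ [] xs = _
  congr 1
  funext acc x
  congr 1
  funext a b
  have hiff : ((a.2 < b.2) ∨ (¬ (b.2 < a.2) ∧ a.1 < b.1))
      ↔ toLex (a.2, a.1) < toLex (b.2, b.1) := by
    rw [Prod.Lex.toLex_lt_toLex]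
    constructor
    · rintro (h | ⟨h1, h2⟩)
      · exact Or.inl h
      · by_cases h3 : a.2 = b.2
        · exact Or.inr ⟨h3, h2⟩
        · exact Or.inl (by omega)
    · rintro (h | ⟨h1, h2⟩)
      · exact Or.inl h
      · exact Or.inr ⟨by omega, h2⟩
  have hd : decide (toLex ((a.2 : Int), (a.1 : Int)) < toLex (b.2, b.1))
      = decide ((a.2 < b.2) ∨ (¬ (b.2 < a.2) ∧ a.1 < b.1)) := decide_eq_decide.mpr hiff.symm
  rw [hd]
  by_cases h1 : a.2 < b.2 <;> by_cases h2 : b.2 < a.2 <;> by_cases h3 : a.1 < b.1 <;>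
    simp [h1, h2, h3]

lemma lexKey_injective : Function.Injective (fun p : Int × Int => toLex (p.2, p.1)) := by
  intro p q h
  have h' : ((p.2, p.1) : Int × Int) = (q.2, q.1) := toLex.injective h
  obtain ⟨p1, p2⟩ := p; obtain ⟨q1, q2⟩ := q
  simp only [Prod.mk.injEq] at h' ⊢
  exact ⟨h'.2, h'.1⟩

lemma pairs_perm (a : List Int) :
    ((PySem.Set.ofList a).filter (fun i => !(i == 0))).map
        (fun i => (i, (PySem.List.count a i : Int)))
      |>.Perm (runPairs (PySem.List.sorted a (fun x => x))) := by
  set b := PySem.List.sorted a (fun x => x) with hbdef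
  have hperm : b.Perm a := PySem.List.sorted_perm a (fun x => x) false
  have hb : b.Pairwise (· ≤ ·) := by
    have := PySem.List.sorted_pairwise a (fun x => x)
    simpa using this
  have hn1 : (((PySem.Set.ofList a).filter (fun i => !(i == 0))).map
      (fun i => (i, (PySem.List.count a i : Int)))).Nodup := by
    apply List.Nodup.map
    · intro x y h; exact (Prod.mk.injEq ..).mp h |>.1
    · exact (PySem.Set.nodup_ofList a).filter _
  have hn2 : (runPairs b).Nodup := runPairs_nodup hb
  rw [List.perm_ext_iff_of_nodup hn1 hn2]
  intro p
  rw [mem_runPairs hb]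
  simp only [List.mem_map, List.mem_filter, PySem.Set.mem_ofList]
  constructor
  · rintro ⟨i, ⟨hi, hiz⟩, rfl⟩
    refine ⟨hperm.mem_iff.mpr hi, by simpa using hiz, ?_⟩
    rw [PySem.List.count_eq, hperm.count_eq]
  · rintro ⟨h1, h2, h3⟩
    refine ⟨p.1, ⟨hperm.mem_iff.mp h1, by simpa using h2⟩, ?_⟩
    obtain ⟨p1, p2⟩ := p
    simp only at h3 ⊢
    rw [PySem.List.count_eq, ← hperm.count_eq, ← h3]

-- ===== VERDICT (by name: the statement is the Claim_ definition above) =====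
theorem sort_graph_spec : Claim_equal_sort_graph := by
  intro a _
  show sort_graph a = sort_graph_alt a
  unfold sort_graph sort_graph_alt
  simp only []
  rw [foldl_skip_zero, List.nil_append]
  congr 1
  rw [sorted2_eq_sorted_lex, sorted2_eq_sorted_lex]
  exact PySem.List.sorted_eq_sorted_of_perm _ _ _ lexKey_injective (pairs_perm a)
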